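-- pv_equiv track=rewrite | github.com/miliar/Code_Jam_Webscraper | solutions_python/Problem_190/179.py | solve
-- ===== SOURCE A (Python) =====
-- op = {
--     'S': 'PS',
--     'P': 'PR',
--     'R': 'RS'
-- }
--
-- def solve(n, r, p, s):
--     if n == 0:
--         if r: return 'R'
--         if p: return 'P'
--         if s: return 'S'
--     s_ = 2**(n-1) - r
--     r_ = 2**(n-1) - p
--     p_ = 2**(n-1) - s
--     if s_ < 0 or r_ < 0 or p_ < 0:
--         return 'IMPOSSIBLE'
--     result = solve(n-1, r_, p_, s_)
--     if result == 'IMPOSSIBLE':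
--         return result
--     return ''.join(map(lambda x:op[x], result))
-- ===== SOURCE B (Python) =====
-- op = {
--     'S': 'PS',
--     'P': 'PR',
--     'R': 'RS'
-- }
--
-- def solve(n, r, p, s):
--     # iterative: transform counts down the levels, then expand the base letter
--     for i in range(n, 0, -1):
--         half = 2 ** (i - 1)
--         s2, r2, p2 = half - r, half - p, half - s
--         if s2 < 0 or r2 < 0 or p2 < 0:
--             return 'IMPOSSIBLE'
--         r, p, s = r2, p2, s2
--     if r:
--         cur = 'R'
--     elif p:
--         cur = 'P'
--     elif s:
--         cur = 'S'
--     else: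
--         return 'IMPOSSIBLE'
--     for _ in range(n, 0, -1):
--         cur = ''.join(op[c] for c in cur)
--     return cur
-- ===== Notes on version B (the rewrite author's own statement) =====
-- stated objective: alternative
-- what changed: Replaces A's top-down recursion that re-expands the bracket string at every unwinding level with two iterative passes: a loop transforming the (r,p,s) counts from level n down to level 0 (early 'IMPOSSIBLE' on a negative count), then picking the base letter and a second loop expanding it n times.
-- outside the precondition, e.g. on solve(-1, 1, 0, 0): A returns 'IMPOSSIBLE', B returns 'R'; on solve(-2, 0, 0, 0): A returns 'IMPOSSIBLE', B returns 'IMPOSSIBLE'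
import Mathlib
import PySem

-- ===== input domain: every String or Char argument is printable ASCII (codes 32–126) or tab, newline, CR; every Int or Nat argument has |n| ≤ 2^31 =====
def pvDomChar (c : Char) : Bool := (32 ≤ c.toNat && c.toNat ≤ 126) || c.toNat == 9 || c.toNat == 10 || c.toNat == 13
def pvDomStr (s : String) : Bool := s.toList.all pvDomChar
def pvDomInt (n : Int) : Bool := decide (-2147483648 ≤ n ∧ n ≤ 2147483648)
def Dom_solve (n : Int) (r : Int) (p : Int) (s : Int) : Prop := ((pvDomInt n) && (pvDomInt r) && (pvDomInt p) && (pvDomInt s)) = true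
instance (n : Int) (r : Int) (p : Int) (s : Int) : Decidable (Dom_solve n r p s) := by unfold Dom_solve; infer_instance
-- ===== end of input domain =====

-- B replaces A's top-down recursion (expanding the bracket once per unwinding level) by two
-- iterative passes: one loop transforming the counts down to level 0, then one loop expanding
-- the base letter; objective: alternative decomposition, same cost.

-- ===== PORT A =====
-- op[x] for A; the dict lookup never misses (result chars are always 'R'/'P'/'S'),
-- the final "XX" branch is Python's unreachable KeyError arm, ported by hand (exact on reachable inputs)
def opA (x : Char) : String :=
  if x = 'S' then "PS" else if x = 'P' then "PR" else if x = 'R' then "RS" else "XX"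

-- A's recursion, on fuel n.toNat (A recurses from n down to 0; inside Pre_solve, 0 ≤ n).
-- At n == 0 with r = p = s = 0 Python A falls through into float arithmetic (2**-1) and
-- returns 'IMPOSSIBLE' two levels deeper; that value is transcribed directly here.
def solveGoA : Nat → Int → Int → Int → String
  | 0, r, p, s =>
    if r ≠ 0 then "R"
    else if p ≠ 0 then "P"
    else if s ≠ 0 then "S"
    else "IMPOSSIBLE"
  | k + 1, r, p, s =>
    let s_ := 2 ^ k - r
    let r_ := 2 ^ k - p
    let p_ := 2 ^ k - s
    if s_ < 0 ∨ r_ < 0 ∨ p_ < 0 then "IMPOSSIBLE"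
    else
      let result := solveGoA k r_ p_ s_
      if result = "IMPOSSIBLE" then result
      else PySem.Str.join "" (result.toList.map opA)

-- For n < 0 Python A skips the base case and wanders into FLOAT arithmetic (2**(n-1) < 1),
-- which cannot be ported under the type convention; wherever it RETURNS there, the value is
-- 'IMPOSSIBLE' (a letter is only produced at n == 0), so that branch is hand-ported as the
-- constant. n < 0 lies outside Pre_solve; nothing is claimed about it.
def solve (n : Int) (r : Int) (p : Int) (s : Int) : String :=
  if n < 0 then "IMPOSSIBLE" else solveGoA n.toNat r p s

-- ===== PORT B =====
-- op[c] for B (same module-level table; the lookup never misses, last arm unreachable)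
def opB (c : Char) : String :=
  if c = 'S' then "PS" else if c = 'P' then "PR" else if c = 'R' then "RS" else "XX"

-- first loop of B: for i in range(n, 0, -1) transform the counts; None = early 'IMPOSSIBLE' return
def loopB : Nat → Int → Int → Int → Option (Int × Int × Int)
  | 0, r, p, s => some (r, p, s)
  | k + 1, r, p, s =>
    let half := (2 : Int) ^ k
    let s2 := half - r
    let r2 := half - p
    let p2 := half - s
    if s2 < 0 ∨ r2 < 0 ∨ p2 < 0 then none
    else loopB k r2 p2 s2

-- second loop of B: n times, cur = ''.join(op[c] for c in cur)
def expandB : Nat → String → String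
  | 0, cur => cur
  | k + 1, cur => expandB k (PySem.Str.join "" (cur.toList.map opB))

def solve_alt (n : Int) (r : Int) (p : Int) (s : Int) : String :=
  match loopB n.toNat r p s with
  | none => "IMPOSSIBLE"
  | some (r', p', s') =>
    if r' ≠ 0 then expandB n.toNat "R"
    else if p' ≠ 0 then expandB n.toNat "P"
    else if s' ≠ 0 then expandB n.toNat "S"
    else "IMPOSSIBLE"

-- ===== PRECONDITION & SPEC =====
-- Pre_ excludes n < 0, where Python A's 2**(n-1) is FLOAT arithmetic (unportable under the
-- type convention); A happens to return 'IMPOSSIBLE' there while B reads the untransformed counts.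
def Pre_solve (n : Int) (r : Int) (p : Int) (s : Int) : Prop := 0 ≤ n
instance (n : Int) (r : Int) (p : Int) (s : Int) : Decidable (Pre_solve n r p s) := by unfold Pre_solve; infer_instance

def pvWitness_solve : Int × Int × Int × Int := (2, 2, 1, 1)

def Spec_solve (n : Int) (r : Int) (p : Int) (s : Int) (out : String) : Prop := out = solve_alt n r p s
instance (n : Int) (r : Int) (p : Int) (s : Int) (out : String) : Decidable (Spec_solve n r p s out) := by unfold Spec_solve; infer_instance

-- ===== CLAIM (what is proved, stated in full; the proofs are below) =====
def Claim_equal_solve : Prop := ∀ (n : Int) (r : Int) (p : Int) (s : Int), Dom_solve n r p s → Pre_solve n r p s → Spec_solve n r p s (solve n r p s)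

-- ===== LEMMAS AND PROOFS =====

-- one expansion pass, list side
theorem join_map_toList (f : Char → String) (x : String) :
    (PySem.Str.join "" (x.toList.map f)).toList = ((x.toList.map f).map String.toList).flatten := by
  simp only [PySem.Str.join, PySem.Chars.join, String.toList_empty, String.toList_ofList]
  generalize (x.toList.map f).map String.toList = l
  induction l with
  | nil => simp [List.intercalate]
  | cons a t ih =>
    cases t with
    | nil => simp [List.intercalate]
    | cons b u =>
      have h : List.intercalate [] (a :: b :: u) = a ++ List.intercalate [] (b :: u) := by
        simp [List.intercalate]
      rw [h, ih]
      simp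

theorem opB_len (c : Char) : (opB c).toList.length = 2 := by
  unfold opB; split_ifs <;> rfl

theorem join_opB_len (x : String) :
    (PySem.Str.join "" (x.toList.map opB)).toList.length = 2 * x.toList.length := by
  rw [join_map_toList]
  rw [List.length_flatten]
  simp only [List.map_map]
  have h2 : (List.length ∘ String.toList ∘ opB) = fun (_ : Char) => 2 := funext fun c => opB_len c
  rw [h2, List.map_const', List.sum_replicate, smul_eq_mul, Nat.mul_comm]

theorem expandB_len : ∀ (k : Nat) (c : String),
    (expandB k c).toList.length = 2 ^ k * c.toList.length
  | 0, c => by simp [expandB]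
  | k + 1, c => by
    rw [expandB, expandB_len k, join_opB_len, Nat.pow_succ]
    ring

theorem expandB_ne_IMP (k : Nat) (c : String) (hc : c.toList.length = 1) :
    expandB k c ≠ "IMPOSSIBLE" := by
  intro h
  have hlen : (expandB k c).toList.length = 10 := by rw [h]; rfl
  rw [expandB_len, hc, Nat.mul_one] at hlen
  rcases Nat.lt_or_ge k 4 with hk | hk
  · interval_cases k <;> simp_all
  · have : 2 ^ 4 ≤ 2 ^ k := Nat.pow_le_pow_right (by norm_num) hk
    omega

-- applying one more pass commutes with expandB
theorem expandB_swap : ∀ (k : Nat) (c : String),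
    expandB k (PySem.Str.join "" (c.toList.map opB)) =
      PySem.Str.join "" ((expandB k c).toList.map opB)
  | 0, c => by simp [expandB]
  | k + 1, c => by
    rw [expandB, expandB_swap k, expandB]

theorem opA_eq_opB : opA = opB := rfl

-- the heart: A's recursion equals B's loop-then-expand composition
theorem solveGoA_eq : ∀ (k : Nat) (r p s : Int),
    solveGoA k r p s =
      (match loopB k r p s with
      | none => "IMPOSSIBLE"
      | some (r', p', s') =>
        if r' ≠ 0 then expandB k "R"
        else if p' ≠ 0 then expandB k "P"
        else if s' ≠ 0 then expandB k "S"
        else "IMPOSSIBLE")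
  | 0, r, p, s => by
    simp only [solveGoA, loopB, expandB]
  | k + 1, r, p, s => by
    rw [solveGoA, loopB]
    simp only
    by_cases hg : 2 ^ k - r < 0 ∨ 2 ^ k - p < 0 ∨ 2 ^ k - s < 0
    · rw [if_pos hg, if_pos hg]
    · rw [if_neg hg, if_neg hg]
      have hR := solveGoA_eq k (2 ^ k - p) (2 ^ k - s) (2 ^ k - r)
      cases hL : loopB k (2 ^ k - p) (2 ^ k - s) (2 ^ k - r) with
      | none =>
        rw [hL] at hR
        simp only at hR
        rw [hR]
        simp
      | some t =>
        obtain ⟨r', p', s'⟩ := t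
        rw [hL] at hR
        simp only at hR
        simp only
        split_ifs at hR with h1 h2 h3
        · rw [hR, if_neg (expandB_ne_IMP k "R" rfl), if_pos h1, opA_eq_opB, ← expandB_swap]
          rfl
        · rw [hR, if_neg (expandB_ne_IMP k "P" rfl), if_neg h1, if_pos h2, opA_eq_opB, ← expandB_swap]
          rfl
        · rw [hR, if_neg (expandB_ne_IMP k "S" rfl), if_neg h1, if_neg h2, if_pos h3, opA_eq_opB, ← expandB_swap]
          rfl
        · rw [hR, if_neg h1, if_neg h2, if_neg h3]
          simp

-- ===== VERDICT (by name: the statement is the Claim_ definition above) =====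
theorem solve_spec : Claim_equal_solve := by
  intro n r p s _ hPre
  unfold Pre_solve at hPre
  unfold Spec_solve solve solve_alt
  rw [if_neg (not_lt.mpr hPre)]
  exact solveGoA_eq n.toNat r p s
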